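-- pv_equiv track=rewrite | github.com/jogonba2/AES | AES/utils/utils.py | check_ngram_blocking
-- ===== SOURCE A (Python) =====
-- def check_ngram_blocking(candidate, ngram_blocking):
--     ngrams_bag = set()
--     for sentence in candidate:
--         ngrams = get_ngrams(sentence, ngram_blocking)
--         if not ngrams_bag.intersection(ngrams):
--             ngrams_bag = ngrams_bag.union(ngrams)
--         else:
--             return True
--     return False
--
-- def get_ngrams(sentence, n):
--     ngrams = set()
--     tok_sent = sentence.split()
--     for i in range(0, len(tok_sent)-n):
--         ngrams.add(tuple(tok_sent[i:i+n]))
--     return ngrams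
-- ===== SOURCE B (Python) =====
-- def get_ngrams(sentence, n):
--     ngrams = set()
--     tok_sent = sentence.split()
--     for i in range(0, len(tok_sent)-n):
--         ngrams.add(tuple(tok_sent[i:i+n]))
--     return ngrams
--
-- def check_ngram_blocking(candidate, ngram_blocking):
--     all_ngrams = []
--     for sentence in candidate:
--         all_ngrams.extend(get_ngrams(sentence, ngram_blocking))
--     return len(set(all_ngrams)) != len(all_ngrams)
-- ===== Notes on version B (the rewrite author's own statement) =====
-- stated objective: alternative
-- what changed: Replaces A's single pass with a growing ngram bag, per-step intersection/union and early return by a two-phase shape: collect every sentence's ngram set into one flat list, then decide by comparing the distinct count with the total count.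
import Mathlib
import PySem

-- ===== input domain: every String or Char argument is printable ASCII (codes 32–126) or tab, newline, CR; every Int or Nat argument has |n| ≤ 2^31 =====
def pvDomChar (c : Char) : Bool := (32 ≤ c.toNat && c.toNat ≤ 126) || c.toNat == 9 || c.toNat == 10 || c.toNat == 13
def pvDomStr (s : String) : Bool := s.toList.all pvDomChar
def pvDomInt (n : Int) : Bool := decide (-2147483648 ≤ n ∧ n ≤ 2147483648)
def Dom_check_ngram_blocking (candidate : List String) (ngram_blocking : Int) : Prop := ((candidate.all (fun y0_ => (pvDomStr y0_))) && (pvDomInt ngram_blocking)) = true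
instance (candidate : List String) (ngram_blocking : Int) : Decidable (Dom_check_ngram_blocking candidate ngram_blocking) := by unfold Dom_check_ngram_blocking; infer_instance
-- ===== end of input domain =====

-- B replaces A's growing-bag single pass (accumulated union + per-step intersection + early
-- return) by a two-phase shape: flatten every sentence's ngram set into one list, then compare
-- the distinct count with the total count; an alternative decomposition, not claimed faster.


-- ===== PORT A =====
-- shared helper (Source B reuses get_ngrams verbatim): Python tuple of words ↦ List String
def get_ngrams (sentence : String) (n : Int) : PySem.Set (List String) :=
  let tok_sent := PySem.Str.split₀ sentence
  (PySem.List.pyRange 0 ((tok_sent.length : Int) - n) 1).foldl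
    (fun ngrams i => PySem.Set.add ngrams (PySem.List.slice tok_sent (some i) (some (i + n))))
    PySem.Set.empty

def cnbLoop (n : Int) (bag : PySem.Set (List String)) : List String → Bool
  | [] => false
  | sentence :: rest =>
    let ngrams := get_ngrams sentence n
    if (PySem.Set.inter bag ngrams).isEmpty then
      cnbLoop n (PySem.Set.union bag ngrams) rest
    else true

def check_ngram_blocking (candidate : List String) (ngram_blocking : Int) : Bool :=
  cnbLoop ngram_blocking PySem.Set.empty candidate

-- ===== PORT B =====
def check_ngram_blocking_alt (candidate : List String) (ngram_blocking : Int) : Bool :=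
  let all_ngrams :=
    candidate.foldl (fun acc sentence => acc ++ get_ngrams sentence ngram_blocking) []
  decide (PySem.List.len (PySem.Set.ofList all_ngrams) ≠ PySem.List.len all_ngrams)

-- ===== PRECONDITION & SPEC =====
def Spec_check_ngram_blocking (candidate : List String) (ngram_blocking : Int) (out : Bool) : Prop := out = check_ngram_blocking_alt candidate ngram_blocking
instance (candidate : List String) (ngram_blocking : Int) (out : Bool) : Decidable (Spec_check_ngram_blocking candidate ngram_blocking out) := by unfold Spec_check_ngram_blocking; infer_instance

-- ===== CLAIM (what is proved, stated in full; the proofs are below) =====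
def Claim_equal_check_ngram_blocking : Prop := ∀ (candidate : List String) (ngram_blocking : Int), Dom_check_ngram_blocking candidate ngram_blocking → Spec_check_ngram_blocking candidate ngram_blocking (check_ngram_blocking candidate ngram_blocking)

-- ===== LEMMAS AND PROOFS =====

-- proof-side helper: "some earlier set meets some later set", by structural recursion
def pairHit : List (PySem.Set (List String)) → Bool
  | [] => false
  | first :: sets => sets.any (fun s => !(PySem.Set.inter first s).isEmpty) || pairHit sets

lemma inter_isEmpty_union (b g t : PySem.Set (List String)) :
    (!(PySem.Set.inter (PySem.Set.union b g) t).isEmpty)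
      = ((!(PySem.Set.inter b t).isEmpty) || (!(PySem.Set.inter g t).isEmpty)) := by
  have key : (PySem.Set.inter (PySem.Set.union b g) t = [])
      ↔ (PySem.Set.inter b t = [] ∧ PySem.Set.inter g t = []) := by
    simp only [List.eq_nil_iff_forall_not_mem, PySem.Set.mem_inter, PySem.Set.mem_union]
    constructor
    · exact fun h => ⟨fun x ⟨hx, ht⟩ => h x ⟨Or.inl hx, ht⟩,
        fun x ⟨hx, ht⟩ => h x ⟨Or.inr hx, ht⟩⟩
    · rintro ⟨h1, h2⟩ x ⟨hx | hx, ht⟩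
      · exact h1 x ⟨hx, ht⟩
      · exact h2 x ⟨hx, ht⟩
  have h2 : (PySem.Set.inter (PySem.Set.union b g) t).isEmpty
      = ((PySem.Set.inter b t).isEmpty && (PySem.Set.inter g t).isEmpty) := by
    rw [Bool.eq_iff_iff]
    simp [List.isEmpty_iff, key]
  rw [h2, Bool.not_and]

lemma any_or {α : Type} (l : List α) (p q : α → Bool) :
    (l.any fun x => p x || q x) = (l.any p || l.any q) := by
  induction l with
  | nil => rfl
  | cons x xs ih => cases hp : p x <;> cases hq : q x <;> simp [List.any_cons, ih, hp, hq]

lemma cnbLoop_eq (n : Int) (cand : List String) : ∀ (bag : PySem.Set (List String)),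
    cnbLoop n bag cand
      = (((cand.map (fun s => get_ngrams s n)).any
            (fun t => !(PySem.Set.inter bag t).isEmpty))
          || pairHit (cand.map (fun s => get_ngrams s n))) := by
  induction cand with
  | nil => intro bag; rfl
  | cons c rest ih =>
    intro bag
    by_cases h : (PySem.Set.inter bag (get_ngrams c n)).isEmpty = true
    · rw [show cnbLoop n bag (c :: rest)
          = cnbLoop n (PySem.Set.union bag (get_ngrams c n)) rest by
            simp [cnbLoop, h]]
      rw [ih]
      simp only [List.map_cons, List.any_cons, pairHit, h,
        inter_isEmpty_union, any_or]
      cases rest.map (fun s => get_ngrams s n) |>.any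
        (fun t => !(PySem.Set.inter bag t).isEmpty) <;>
        cases rest.map (fun s => get_ngrams s n) |>.any
          (fun t => !(PySem.Set.inter (get_ngrams c n) t).isEmpty) <;>
        cases pairHit (rest.map (fun s => get_ngrams s n)) <;> simp
    · rw [show cnbLoop n bag (c :: rest) = true by simp [cnbLoop, h]]
      simp [List.any_cons, h]

lemma inter_empty_left (t : PySem.Set (List String)) :
    PySem.Set.inter ([] : PySem.Set (List String)) t = [] := by
  simp [List.eq_nil_iff_forall_not_mem, PySem.Set.mem_inter]

lemma nodup_get_ngrams (s : String) (n : Int) : (get_ngrams s n).Nodup := by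
  unfold get_ngrams
  have aux : ∀ (l : List Int) (acc : PySem.Set (List String)), acc.Nodup →
      (l.foldl (fun ngrams i =>
        PySem.Set.add ngrams (PySem.List.slice (PySem.Str.split₀ s) (some i) (some (i + n)))) acc).Nodup := by
    intro l
    induction l with
    | nil => exact fun acc h => h
    | cons i l ih => exact fun acc h => ih _ (PySem.Set.nodup_add _ _ h)
  exact aux _ PySem.Set.empty List.nodup_nil


lemma inter_eq_nil_iff_disjoint (a b : PySem.Set (List String)) :
    PySem.Set.inter a b = [] ↔ a.Disjoint b := by
  simp only [List.eq_nil_iff_forall_not_mem, PySem.Set.mem_inter, List.Disjoint]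
  constructor
  · intro h x hxa hxb; exact h x ⟨hxa, hxb⟩
  · rintro h x ⟨hxa, hxb⟩; exact h hxa hxb

lemma pairHit_eq_false_iff (sets : List (PySem.Set (List String))) :
    pairHit sets = false ↔ sets.Pairwise List.Disjoint := by
  induction sets with
  | nil => simp [pairHit]
  | cons s rest ih =>
    simp only [pairHit, Bool.or_eq_false_iff, List.any_eq_false, List.pairwise_cons, ih,
      Bool.not_eq_true']
    simp [inter_eq_nil_iff_disjoint]

lemma ofList_length_eq_iff (xs : List (List String)) :
    (PySem.Set.ofList xs).length = xs.length ↔ xs.Nodup := by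
  have hperm : (PySem.Set.ofList xs).Perm xs.dedup := by
    rw [List.perm_ext_iff_of_nodup (PySem.Set.nodup_ofList _) xs.nodup_dedup]
    intro a; simp [PySem.Set.mem_ofList, List.mem_dedup]
  rw [hperm.length_eq]
  constructor
  · intro h
    exact List.dedup_eq_self.mp ((xs.dedup_sublist).eq_of_length h)
  · intro h; rw [List.dedup_eq_self.mpr h]

-- B-side bool ↔ "the flattened list has a repeat"
lemma bool_eq_not_decide (b : Bool) (P : Prop) [Decidable P] (h : b = false ↔ P) :
    b = !decide P := by
  by_cases hp : P <;> simp_all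

-- ===== VERDICT (by name: the statement is the Claim_ definition above) =====
theorem check_ngram_blocking_spec : Claim_equal_check_ngram_blocking := by
  intro candidate n _
  unfold Spec_check_ngram_blocking check_ngram_blocking check_ngram_blocking_alt
  rw [show (PySem.Set.empty : PySem.Set (List String)) = [] from rfl, cnbLoop_eq]
  rw [PySem.List.foldl_append_eq_flatMap, List.nil_append,
    List.flatMap_def]
  set sets := candidate.map (fun s => get_ngrams s n) with hsets
  have hA : ((sets.any (fun t => !(PySem.Set.inter ([] : PySem.Set (List String)) t).isEmpty))
      || pairHit sets) = pairHit sets := by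
    simp [inter_empty_left]
  rw [hA]
  have hnodups : ∀ l ∈ sets, l.Nodup := by
    intro l hl
    rcases List.mem_map.mp hl with ⟨s, _, rfl⟩
    exact nodup_get_ngrams s n
  have hiff : pairHit sets = false
      ↔ (PySem.List.len (PySem.Set.ofList sets.flatten) = PySem.List.len sets.flatten) := by
    rw [pairHit_eq_false_iff]
    rw [PySem.List.len_eq, PySem.List.len_eq, Nat.cast_inj, ofList_length_eq_iff,
      List.nodup_flatten]
    constructor
    · intro h; exact ⟨hnodups, h⟩
    · intro h; exact h.2
  rw [bool_eq_not_decide (pairHit sets)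
      (PySem.List.len (PySem.Set.ofList sets.flatten) = PySem.List.len sets.flatten) hiff]
  simp
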